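-- pv_equiv track=rewrite | github.com/ashithss/CloudOpsGenAI | main.py | _clean_k8s_response
-- ===== SOURCE A (Python) =====
-- def _clean_k8s_response(response):
--     """Clean up the K8s manifests response from the model"""
--     # Remove any markdown code blocks
--     response = response.replace('```yaml', '').replace('```yml', '').replace('```', '')
--
--     # Remove explanatory text that might be at the beginning
--     lines = response.split('\n')
--     cleaned_lines = []
--     yaml_started = False
--
--     for line in lines:
--         if not yaml_started:
--             # Look for YAML content starting
--             if line.strip().startswith('apiVersion:') or line.strip().startswith('---'):
--                 yaml_started = True
--                 cleaned_lines.append(line)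
--             continue
--         cleaned_lines.append(line)
--
--     return '\n'.join(cleaned_lines)
-- ===== SOURCE B (Python) =====
-- def _clean_k8s_response(response):
--     """Clean up the K8s manifests response from the model"""
--     # Remove any markdown code blocks
--     for fence in ('```yaml', '```yml', '```'):
--         response = response.replace(fence, '')
--
--     # Peel lines off the front of the string until the YAML content starts;
--     # return the remaining suffix of the string directly (no line list, no join).
--     s = response
--     while True:
--         head, sep, tail = s.partition('\n')
--         if head.strip().startswith('apiVersion:') or head.strip().startswith('---'):
--             return s
--         if not sep:
--             return ''
--         s = tail
-- ===== Notes on version B (the rewrite author's own statement) =====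
-- stated objective: alternative
-- what changed: Instead of splitting into a line list and threading a yaml_started flag through an accumulate-then-join loop, B peels one line at a time off the front of the string with str.partition and returns the remaining string suffix directly, never building a line list or joining.
import Mathlib
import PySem

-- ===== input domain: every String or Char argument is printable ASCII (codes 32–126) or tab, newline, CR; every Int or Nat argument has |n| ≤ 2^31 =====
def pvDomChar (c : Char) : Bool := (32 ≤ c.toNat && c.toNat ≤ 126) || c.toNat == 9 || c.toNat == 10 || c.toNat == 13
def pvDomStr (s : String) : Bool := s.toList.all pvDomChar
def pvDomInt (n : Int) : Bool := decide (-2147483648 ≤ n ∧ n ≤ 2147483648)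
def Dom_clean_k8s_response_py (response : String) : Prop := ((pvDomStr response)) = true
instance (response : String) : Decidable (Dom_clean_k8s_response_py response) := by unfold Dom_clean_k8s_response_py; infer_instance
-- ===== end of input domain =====

-- B peels lines off the front of the string with partition('\n') and returns the
-- remaining string suffix directly, instead of A's split-into-lines / flag-loop /
-- accumulate / join pipeline (objective: alternative decomposition, same cost).

-- ===== PORT A =====
-- line.strip().startswith('apiVersion:') or line.strip().startswith('---')
def pvIsYamlStart (line : List Char) : Bool :=
  PySem.Chars.startswith (PySem.Chars.strip line) "apiVersion:".toList ||
  PySem.Chars.startswith (PySem.Chars.strip line) "---".toList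

-- the for-loop of A: state = (yaml_started, cleaned_lines built front-to-back)
def pvALoop (started : Bool) : List (List Char) → List (List Char)
  | [] => []
  | line :: rest =>
    if started then line :: pvALoop true rest
    else if pvIsYamlStart line then line :: pvALoop true rest
    else pvALoop false rest

def clean_k8s_response_py (response : String) : String :=
  let response := PySem.Str.replace (PySem.Str.replace (PySem.Str.replace response "```yaml" "") "```yml" "") "```" ""
  let lines := PySem.Chars.splitOn response.toList ['\n']
  String.ofList (PySem.Chars.join ['\n'] (pvALoop false lines))

-- ===== PORT B =====
-- the while-loop of Source B: head, sep, tail = s.partition('\n'); return s / '' / continue on tail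
def pvBLoop (s : List Char) : List Char :=
  if pvIsYamlStart (s.takeWhile (· ≠ '\n')) then s
  else
    match h : s.dropWhile (· ≠ '\n') with
    | [] => []
    | _ :: tail => pvBLoop tail
termination_by s.length
decreasing_by
  have hle := List.length_dropWhile_le (· ≠ '\n') s
  have hlen := congrArg List.length h
  simp only [List.length_cons] at hlen
  omega

def clean_k8s_response_py_alt (response : String) : String :=
  let response := PySem.Str.replace (PySem.Str.replace (PySem.Str.replace response "```yaml" "") "```yml" "") "```" ""
  String.ofList (pvBLoop response.toList)

-- ===== PRECONDITION & SPEC =====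
def Spec_clean_k8s_response_py (response : String) (out : String) : Prop := out = clean_k8s_response_py_alt response
instance (response : String) (out : String) : Decidable (Spec_clean_k8s_response_py response out) := by unfold Spec_clean_k8s_response_py; infer_instance

-- ===== CLAIM =====
def Claim_equal_clean_k8s_response_py : Prop := ∀ (response : String), Dom_clean_k8s_response_py response → Spec_clean_k8s_response_py response (clean_k8s_response_py response)

-- ===== LEMMAS AND PROOFS =====
-- pure single-'\n' split, structurally recursive (proof helper only)
def pvSplit (s : List Char) : List (List Char) :=
  match h : s.dropWhile (· ≠ '\n') with
  | [] => [s.takeWhile (· ≠ '\n')]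
  | _ :: t => s.takeWhile (· ≠ '\n') :: pvSplit t
termination_by s.length
decreasing_by
  have hle := List.length_dropWhile_le (· ≠ '\n') s
  have hlen := congrArg List.length h
  simp only [List.length_cons] at hlen
  omega

-- derived equations for pvSplit (its match carries a dependent hypothesis)
theorem pvSplit_eq_nil (s : List Char) (h : s.dropWhile (· ≠ '\n') = []) :
    pvSplit s = [s.takeWhile (· ≠ '\n')] := by
  rw [pvSplit.eq_def]
  split
  · rfl
  · next head t' heq => rw [h] at heq; cases heq

theorem pvSplit_eq_cons (s : List Char) (c : Char) (t : List Char)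
    (h : s.dropWhile (· ≠ '\n') = c :: t) :
    pvSplit s = s.takeWhile (· ≠ '\n') :: pvSplit t := by
  rw [pvSplit.eq_def]
  split
  · next heq => rw [h] at heq; cases heq
  · next head t' heq => rw [h] at heq; cases heq; rfl

theorem dropWhile_cons_ne (c : Char) (rest : List Char) (hc : ¬ c = '\n') :
    (c :: rest).dropWhile (· ≠ '\n') = rest.dropWhile (· ≠ '\n') := by
  simp [List.dropWhile, hc]

theorem takeWhile_cons_ne (c : Char) (rest : List Char) (hc : ¬ c = '\n') :
    (c :: rest).takeWhile (· ≠ '\n') = c :: rest.takeWhile (· ≠ '\n') := by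
  simp [List.takeWhile, hc]

theorem pvSplit_cons_ne (c : Char) (rest : List Char) (hc : ¬ c = '\n') :
    pvSplit (c :: rest) = (pvSplit rest).modifyHead (c :: ·) := by
  cases hd : rest.dropWhile (· ≠ '\n') with
  | nil =>
    rw [pvSplit_eq_nil rest hd, pvSplit_eq_nil (c :: rest) (by rw [dropWhile_cons_ne c rest hc, hd]),
        takeWhile_cons_ne c rest hc]
    rfl
  | cons d t =>
    rw [pvSplit_eq_cons rest d t hd,
        pvSplit_eq_cons (c :: rest) d t (by rw [dropWhile_cons_ne c rest hc, hd]),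
        takeWhile_cons_ne c rest hc]
    rfl

theorem pvSplit_cons_nl (rest : List Char) :
    pvSplit ('\n' :: rest) = [] :: pvSplit rest := by
  rw [pvSplit_eq_cons ('\n' :: rest) '\n' rest (by simp [List.dropWhile])]
  simp [List.takeWhile]

theorem pvGo_eq (fuel : Nat) (l cur : List Char) (acc : List (List Char)) (h : l.length < fuel) :
    PySem.Chars.splitOn.go ['\n'] fuel l cur acc
      = acc.reverse ++ (pvSplit l).modifyHead (cur.reverse ++ ·) := by
  induction fuel generalizing l cur acc with
  | zero => omega
  | succ fuel ih =>
    cases l with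
    | nil =>
      rw [pvSplit_eq_nil [] rfl]
      simp [PySem.Chars.splitOn.go]
    | cons c rest =>
      by_cases hc : c = '\n'
      · subst hc
        rw [show PySem.Chars.splitOn.go ['\n'] (fuel+1) ('\n'::rest) cur acc
              = PySem.Chars.splitOn.go ['\n'] fuel rest [] (cur.reverse :: acc) by
            simp [PySem.Chars.splitOn.go, List.isPrefixOf]]
        rw [ih rest [] (cur.reverse :: acc) (by simp at h ⊢; omega), pvSplit_cons_nl]
        cases pvSplit rest <;> simp [List.modifyHead]
      · have hc' : ('\n' == c) = false := by simp [Ne.symm hc]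
        rw [show PySem.Chars.splitOn.go ['\n'] (fuel+1) (c::rest) cur acc
              = PySem.Chars.splitOn.go ['\n'] fuel rest (c :: cur) acc by
            simp [PySem.Chars.splitOn.go, List.isPrefixOf, hc']]
        rw [ih rest (c :: cur) acc (by simp at h ⊢; omega), pvSplit_cons_ne c rest hc]
        cases pvSplit rest <;> simp [List.modifyHead]

theorem splitOn_eq_pvSplit (s : List Char) :
    PySem.Chars.splitOn s ['\n'] = pvSplit s := by
  unfold PySem.Chars.splitOn
  rw [pvGo_eq _ _ _ _ (by omega)]
  cases h : pvSplit s <;> simp [List.modifyHead]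

theorem pvSplit_ne_nil (s : List Char) : pvSplit s ≠ [] := by
  rw [pvSplit.eq_def]; split <;> simp

theorem takeWhile_append_dropWhile_nl (s : List Char) :
    s.takeWhile (· ≠ '\n') ++ s.dropWhile (· ≠ '\n') = s := List.takeWhile_append_dropWhile ..

theorem dropWhile_nl_head (s : List Char) (c : Char) (rest : List Char)
    (hx : s.dropWhile (· ≠ '\n') = c :: rest) : c = '\n' := by
  have := List.head?_dropWhile_not (· ≠ '\n') s
  rw [hx] at this
  simpa using this

theorem join_one (x : List Char) : PySem.Chars.join ['\n'] [x] = x := by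
  simp [PySem.Chars.join, List.intercalate]

theorem join_cons (x : List Char) (ys : List (List Char)) (hys : ys ≠ []) :
    PySem.Chars.join ['\n'] (x :: ys) = x ++ '\n' :: PySem.Chars.join ['\n'] ys := by
  cases ys with
  | nil => exact absurd rfl hys
  | cons a as => simp [PySem.Chars.join, List.intercalate]

theorem join_pvSplit (s : List Char) : PySem.Chars.join ['\n'] (pvSplit s) = s := by
  induction s using pvSplit.induct with
  | case1 s h =>
    rw [pvSplit_eq_nil s h, join_one]
    have hsd := takeWhile_append_dropWhile_nl s
    rw [h, List.append_nil] at hsd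
    exact hsd
  | case2 s c t h ih =>
    rw [pvSplit_eq_cons s c t h, join_cons _ _ (pvSplit_ne_nil t), ih]
    have hc : c = '\n' := dropWhile_nl_head s c t h
    subst hc
    have hsd := takeWhile_append_dropWhile_nl s
    rw [h] at hsd
    exact hsd

theorem pvALoop_true (xs : List (List Char)) : pvALoop true xs = xs := by
  induction xs with
  | nil => rfl
  | cons x rest ih => simp [pvALoop, ih]

-- derived equations for pvBLoop
theorem pvBLoop_yaml (s : List Char) (hy : pvIsYamlStart (s.takeWhile (· ≠ '\n')) = true) :
    pvBLoop s = s := by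
  rw [pvBLoop.eq_def, if_pos hy]

theorem pvBLoop_nil (s : List Char) (hy : ¬ pvIsYamlStart (s.takeWhile (· ≠ '\n')) = true)
    (h : s.dropWhile (· ≠ '\n') = []) : pvBLoop s = [] := by
  rw [pvBLoop.eq_def, if_neg hy]
  split
  · rfl
  · next head t' heq => rw [h] at heq; cases heq

theorem pvBLoop_cons (s : List Char) (c : Char) (t : List Char)
    (hy : ¬ pvIsYamlStart (s.takeWhile (· ≠ '\n')) = true)
    (h : s.dropWhile (· ≠ '\n') = c :: t) : pvBLoop s = pvBLoop t := by
  rw [pvBLoop.eq_def, if_neg hy]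
  split
  · next heq => rw [h] at heq; cases heq
  · next head t' heq => rw [h] at heq; cases heq; rfl

theorem pvBLoop_eq (s : List Char) :
    pvBLoop s = PySem.Chars.join ['\n'] (pvALoop false (pvSplit s)) := by
  induction s using pvSplit.induct with
  | case1 s h =>
    rw [pvSplit_eq_nil s h]
    by_cases hy : pvIsYamlStart (s.takeWhile (· ≠ '\n')) = true
    · rw [pvBLoop_yaml s hy]
      simp only [pvALoop, Bool.false_eq_true, if_false, hy, if_true, join_one]
      have hsd := takeWhile_append_dropWhile_nl s
      rw [h, List.append_nil] at hsd
      exact hsd.symm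
    · rw [pvBLoop_nil s hy h]
      simp only [pvALoop, Bool.false_eq_true, if_false, hy]
      rfl
  | case2 s c t h ih =>
    rw [pvSplit_eq_cons s c t h]
    by_cases hy : pvIsYamlStart (s.takeWhile (· ≠ '\n')) = true
    · rw [pvBLoop_yaml s hy]
      simp only [pvALoop, Bool.false_eq_true, if_false, hy, if_true, pvALoop_true]
      rw [join_cons _ _ (pvSplit_ne_nil t), join_pvSplit]
      have hc : c = '\n' := dropWhile_nl_head s c t h
      subst hc
      have hsd := takeWhile_append_dropWhile_nl s
      rw [h] at hsd
      exact hsd.symm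
    · rw [pvBLoop_cons s c t hy h]
      simp only [pvALoop, Bool.false_eq_true, if_false, hy]
      exact ih

-- ===== VERDICT =====
theorem clean_k8s_response_py_spec : Claim_equal_clean_k8s_response_py := by
  intro response _
  unfold Spec_clean_k8s_response_py clean_k8s_response_py clean_k8s_response_py_alt
  simp only [splitOn_eq_pvSplit, pvBLoop_eq]
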